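-- pv_equiv track=rewrite | github.com/odaramola92/glycofragR | glycofrag/glycan/facade.py | _format_composition_string
-- ===== SOURCE A (Python) =====
-- from typing import List, Optional, Dict, Any, Tuple, Set, Union
--
-- def _format_composition_string(composition: Dict[str, int]) -> str:
--     """
--     Format a glycan composition as a compact human-readable string.
--
--     Args:
--         composition: Dict of monosaccharide counts (e.g., {'H': 5, 'N': 4, 'S': 2})
--
--     Returns:
--         Formatted string like "H5N4S2" or "H3N2" (standard IUPACfragment notation shorthand)
--     """
--     if not composition:
--         return ""
--
--     # Order: H (Hex), N (HexNAc), F (Fuc), S (Sia/NeuAc), P (Phospho), etc.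
--     order = ['H', 'N', 'F', 'S', 'P', 'U']  # U for unknowns
--     parts = []
--
--     for key in order:
--         if key in composition and composition[key] > 0:
--             parts.append(f"{key}{composition[key]}")
--
--     # Add any other keys not in the standard order
--     for key, count in sorted(composition.items()):
--         if key not in order and count > 0:
--             parts.append(f"{key}{count}")
--
--     return "".join(parts)
-- ===== SOURCE B (Python) =====
-- def _format_composition_string(composition):
--     """Single sort-then-emit pass: rank known keys by fixed priority, unknown keys after, alphabetically."""
--     rank = {'H': 0, 'N': 1, 'F': 2, 'S': 3, 'P': 4, 'U': 5}
--     items = sorted(composition.items(), key=lambda kv: (rank.get(kv[0], 6), kv[0]))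
--     return "".join(f"{k}{v}" for k, v in items if v > 0)
-- ===== Notes on version B (the rewrite author's own statement) =====
-- stated objective: idiomatic
-- what changed: A's two-phase construction (a fixed-order membership/lookup loop over the six known keys, then a second loop over the alphabetically sorted items skipping known keys) is replaced by one sort-then-emit pass: all items are sorted once by the key (rank.get(k, 6), k) so known keys come first in priority order and unknown keys follow alphabetically, then positive-count items are emitted and joined.
import Mathlib
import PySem

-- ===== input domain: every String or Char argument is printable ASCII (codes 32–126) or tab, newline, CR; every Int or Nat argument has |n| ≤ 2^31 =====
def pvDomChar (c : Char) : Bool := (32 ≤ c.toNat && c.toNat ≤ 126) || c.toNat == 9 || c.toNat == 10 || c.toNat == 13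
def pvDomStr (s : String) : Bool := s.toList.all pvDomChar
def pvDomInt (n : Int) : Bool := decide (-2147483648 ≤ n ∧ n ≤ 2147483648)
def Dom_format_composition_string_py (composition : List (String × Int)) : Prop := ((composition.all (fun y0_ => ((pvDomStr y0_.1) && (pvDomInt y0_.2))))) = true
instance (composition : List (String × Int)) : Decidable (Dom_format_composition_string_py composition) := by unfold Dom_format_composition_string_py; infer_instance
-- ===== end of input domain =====

-- B replaces A's two-loop construction (fixed known-key loop + sorted-remainder loop) with a
-- single sort of all items by (rank, key) followed by one emit pass; objective: idiomatic, same cost.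


-- ===== PORT A =====
-- order = ['H', 'N', 'F', 'S', 'P', 'U']  (shared constant; also the rank table used by B)
def pvOrder : List String := ["H", "N", "F", "S", "P", "U"]
def pvRank : PySem.Dict String Int :=
  PySem.Dict.ofList [("H", 0), ("N", 1), ("F", 2), ("S", 3), ("P", 4), ("U", 5)]


-- Python A: empty-dict guard, then the fixed-order loop, then the sorted-remainder loop.
def format_composition_string_py (composition : List (String × Int)) : String :=
  let d := PySem.Dict.ofList composition
  if PySem.Dict.size d = 0 then ""
  else
    let parts : List String := pvOrder.foldl (fun parts key =>
      if PySem.Dict.contains d key && decide (0 < PySem.Dict.getD d key 0) then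
        parts ++ [key ++ PySem.Int.toStr (PySem.Dict.getD d key 0)]
      else parts) []
    let parts := (PySem.List.sorted2 (PySem.Dict.items d) (fun p => p.1) (fun p => p.2)).foldl
      (fun parts p =>
        if !pvOrder.contains p.1 && decide (0 < p.2) then parts ++ [p.1 ++ PySem.Int.toStr p.2]
        else parts) parts
    PySem.Str.join "" parts

-- ===== PORT B =====
-- Python B: one sort of all items by (rank.get(k, 6), k), then emit k+str(v) for v > 0 and join.
def format_composition_string_py_alt (composition : List (String × Int)) : String :=
  let items := PySem.List.sorted2 (PySem.Dict.items (PySem.Dict.ofList composition))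
    (fun kv => PySem.Dict.getD pvRank kv.1 6) (fun kv => kv.1)
  PySem.Str.join "" ((items.filter (fun kv => decide (0 < kv.2))).map
    (fun kv => kv.1 ++ PySem.Int.toStr kv.2))


-- ===== PRECONDITION & SPEC =====
def Spec_format_composition_string_py (composition : List (String × Int)) (out : String) : Prop := out = format_composition_string_py_alt composition
instance (composition : List (String × Int)) (out : String) : Decidable (Spec_format_composition_string_py composition out) := by unfold Spec_format_composition_string_py; infer_instance

-- ===== CLAIM (what is proved, stated in full; the proofs are below) =====
def Claim_equal_format_composition_string_py : Prop := ∀ (composition : List (String × Int)), Dom_format_composition_string_py composition → Spec_format_composition_string_py composition (format_composition_string_py composition)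

-- ===== LEMMAS AND PROOFS =====
-- proof-side abbreviations
def pvPos : String × Int → Bool := fun p => decide (0 < p.2)
def pvUnk : String × Int → Bool := fun p => !pvOrder.contains p.1
def pvEmit : String × Int → String := fun p => p.1 ++ PySem.Int.toStr p.2
def pvSKey : String → String :=
  fun k => String.ofList (Char.ofNat (48 + (PySem.Dict.getD pvRank k 6).toNat) :: k.toList)
def pvKnown (d : PySem.Dict String Int) : List (String × Int) :=
  pvOrder.filterMap (fun k => (PySem.Dict.get? d k).map (fun v => (k, v)))

-- rank facts
theorem pvRank_getD (k : String) :
    PySem.Dict.getD pvRank k 6 =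
      if "H" = k then 0 else if "N" = k then 1 else if "F" = k then 2 else if "S" = k then 3
      else if "P" = k then 4 else if "U" = k then 5 else 6 := by
  have h : pvRank = PySem.Dict.mk [("H",0),("N",1),("F",2),("S",3),("P",4),("U",5)] := by decide
  rw [PySem.Dict.getD_eq_get?_getD, h]
  simp only [PySem.Dict.get?_mk_cons, beq_iff_eq]
  split_ifs <;> rfl

theorem pvRank_bounds (k : String) :
    0 ≤ PySem.Dict.getD pvRank k 6 ∧ PySem.Dict.getD pvRank k 6 ≤ 6 := by
  rw [pvRank_getD]; split_ifs <;> omega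

theorem pvRank_lt_of_mem (k : String) (h : k ∈ pvOrder) :
    PySem.Dict.getD pvRank k 6 < 6 := by
  simp [pvOrder] at h
  rcases h with h|h|h|h|h|h <;> subst h <;> decide

-- char / string lex facts
theorem pvCharDigit_lt {i j : ℕ} (hij : i < j) (hj : j ≤ 6) :
    Char.ofNat (48 + i) < Char.ofNat (48 + j) := by
  interval_cases j <;> interval_cases i <;> decide

theorem pvStr_head_lt {c c' : Char} (t t' : List Char) (h : c < c') :
    String.ofList (c :: t) < String.ofList (c' :: t') := by
  rw [String.lt_iff_toList_lt, String.toList_ofList, String.toList_ofList]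
  show List.lt _ _
  rw [List.lt_iff_lex_lt]
  exact List.Lex.rel h

theorem pvStr_head_eq_lt_iff (c : Char) (s s' : String) :
    (String.ofList (c :: s.toList) < String.ofList (c :: s'.toList)) ↔ s < s' := by
  rw [String.lt_iff_toList_lt, String.toList_ofList, String.toList_ofList]
  show List.lt _ _ ↔ _
  rw [List.lt_iff_lex_lt, List.cons_lex_cons_iff]
  simp

theorem pvSKey_lt_of_rank_lt {k k' : String}
    (h : PySem.Dict.getD pvRank k 6 < PySem.Dict.getD pvRank k' 6) :
    pvSKey k < pvSKey k' := by
  apply pvStr_head_lt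
  apply pvCharDigit_lt
  · have b1 := pvRank_bounds k; have b2 := pvRank_bounds k'; omega
  · have b2 := pvRank_bounds k'; omega

theorem pvSKey_lt_iff_of_rank_eq {k k' : String}
    (h : PySem.Dict.getD pvRank k 6 = PySem.Dict.getD pvRank k' 6) :
    (pvSKey k < pvSKey k') ↔ k < k' := by
  unfold pvSKey
  rw [h]
  exact pvStr_head_eq_lt_iff _ _ _

theorem pvCmpB (k k' : String) :
    (decide (PySem.Dict.getD pvRank k 6 < PySem.Dict.getD pvRank k' 6) ||
      (!decide (PySem.Dict.getD pvRank k' 6 < PySem.Dict.getD pvRank k 6) && decide (k < k')))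
    = decide (pvSKey k < pvSKey k') := by
  rcases lt_trichotomy (PySem.Dict.getD pvRank k 6) (PySem.Dict.getD pvRank k' 6) with h|h|h
  · simp [h, pvSKey_lt_of_rank_lt h]
  · simp [h, pvSKey_lt_iff_of_rank_eq h]
  · simp [h, not_lt_of_gt h, (pvSKey_lt_of_rank_lt h).asymm]

theorem pvRank_getD_of_not_mem (k : String) (h : k ∉ pvOrder) :
    PySem.Dict.getD pvRank k 6 = 6 := by
  simp [pvOrder] at h
  rw [pvRank_getD, if_neg (Ne.symm h.1), if_neg (Ne.symm h.2.1), if_neg (Ne.symm h.2.2.1),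
    if_neg (Ne.symm h.2.2.2.1), if_neg (Ne.symm h.2.2.2.2.1), if_neg (Ne.symm h.2.2.2.2.2)]

-- insertion-sort comparator congruence
theorem pvInsertBy_congr {α : Type} (b b' : α → α → Bool) (x : α) (ys : List α)
    (h : ∀ y ∈ ys, b x y = b' x y) :
    PySem.List.insertBy b x ys = PySem.List.insertBy b' x ys := by
  induction ys with
  | nil => rfl
  | cons y ys ih =>
    simp only [PySem.List.insertBy]
    rw [h y (by simp)]
    by_cases hb : b' x y = true
    · simp [hb]
    · simp only [hb]
      rw [ih (fun z hz => h z (by simp [hz]))]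

theorem pvFoldl_insertBy_congr {α : Type} (b b' : α → α → Bool) (S : List α) 
    (h : ∀ a ∈ S, ∀ c ∈ S, b a c = b' a c) :
    ∀ (xs acc : List α), (∀ x ∈ xs, x ∈ S) → (∀ x ∈ acc, x ∈ S) →
    xs.foldl (fun acc x => PySem.List.insertBy b x acc) acc
      = xs.foldl (fun acc x => PySem.List.insertBy b' x acc) acc := by
  intro xs
  induction xs with
  | nil => intro acc _ _; rfl
  | cons x xs ih =>
    intro acc hxs hacc
    simp only [List.foldl_cons]
    rw [pvInsertBy_congr b b' x acc (fun y hy => h x (hxs x (by simp)) y (hacc y hy))]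
    exact ih _ (fun z hz => hxs z (by simp [hz]))
      (fun z hz => ((PySem.List.mem_insertBy b' x z acc).1 hz).elim
        (fun e => e ▸ hxs x (by simp)) (hacc z))

-- sorted2 → single-key sorted conversions
theorem pvSorted2A (l : List (String × Int)) (hn : (l.map Prod.fst).Nodup) :
    PySem.List.sorted2 l (fun p => p.1) (fun p => p.2)
      = PySem.List.sorted l (fun p => p.1) := by
  show l.foldl (fun acc x => PySem.List.insertBy _ x acc) []
      = l.foldl (fun acc x => PySem.List.insertBy _ x acc) []
  apply pvFoldl_insertBy_congr _ _ l _ l [] (fun x hx => hx) (by simp)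
  intro a ha c hc
  rcases lt_trichotomy a.1 c.1 with h|h|h
  · simp [h]
  · have : a = c := List.inj_on_of_nodup_map hn ha hc h
    subst this
    simp
  · simp [h, not_lt_of_gt h]

theorem pvSorted2B (l : List (String × Int)) :
    PySem.List.sorted2 l (fun kv => PySem.Dict.getD pvRank kv.1 6) (fun kv => kv.1)
      = PySem.List.sorted l (fun kv => pvSKey kv.1) := by
  show l.foldl (fun acc x => PySem.List.insertBy _ x acc) []
      = l.foldl (fun acc x => PySem.List.insertBy _ x acc) []
  apply pvFoldl_insertBy_congr _ _ l _ l [] (fun x hx => hx) (by simp)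
  intro a _ c _
  exact pvCmpB a.1 c.1

-- permutation: filter of a disjunction splits
theorem pvFilter_or_perm {α : Type} (a b : α → Bool) (l : List α)
    (hdisj : ∀ p ∈ l, ¬(a p = true ∧ b p = true)) :
    (l.filter (fun p => a p || b p)).Perm (l.filter a ++ l.filter b) := by
  induction l with
  | nil => simp
  | cons x l ih =>
    have ih' := ih (fun p hp => hdisj p (by simp [hp]))
    by_cases hax : a x = true
    · have hbx : b x = false := by
        rcases Bool.eq_false_or_eq_true (b x) with h|h
        · exact absurd ⟨hax, h⟩ (hdisj x (by simp))
        · exact h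
      simp only [List.filter_cons, hax, hbx, Bool.true_or, if_true]
      simpa using ih'.cons x
    · simp only [Bool.not_eq_true] at hax
      by_cases hbx : b x = true
      · simp only [List.filter_cons, hax, hbx, Bool.false_or, if_true]
        exact (ih'.cons x).trans (List.perm_middle).symm
      · simp only [Bool.not_eq_true] at hbx
        simp only [List.filter_cons, hax, hbx, Bool.false_or]
        simpa using ih'

theorem pvFilter_key_single (l : List (String × Int)) (hn : (l.map Prod.fst).Nodup)
    (k : String) (v : Int) (hm : (k, v) ∈ l) :
    l.filter (fun p => p.1 == k) = [(k, v)] := by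
  induction l with
  | nil => simp at hm
  | cons x l ih =>
    simp only [List.map_cons, List.nodup_cons] at hn
    rcases List.mem_cons.1 hm with h|h
    · subst h
      simp only [List.filter_cons, beq_self_eq_true, if_true]
      have : l.filter (fun p => p.1 == k) = [] := by
        apply List.filter_eq_nil_iff.2
        intro p hp
        simp only [beq_iff_eq]
        intro hpk
        have : p.1 ∈ l.map Prod.fst := List.mem_map_of_mem (f := Prod.fst) hp
        exact hn.1 (hpk ▸ this)
      rw [this]
    · have hx : (x.1 == k) = false := by
        simp only [beq_eq_false_iff_ne, ne_eq]
        intro hxk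
        have : (k, v).1 ∈ l.map Prod.fst := List.mem_map_of_mem (f := Prod.fst) h
        exact hn.1 (hxk ▸ this)
      simp only [List.filter_cons, hx]
      exact ih hn.2 h
  
theorem pvFilter_key_nil (l : List (String × Int)) (k : String)
    (h : k ∉ l.map Prod.fst) :
    l.filter (fun p => p.1 == k) = [] := by
  apply List.filter_eq_nil_iff.2
  intro p hp
  simp only [beq_iff_eq]
  intro hpk
  have : p.1 ∈ l.map Prod.fst := List.mem_map_of_mem (f := Prod.fst) hp
  exact h (hpk ▸ this)

theorem pvKnown_perm_gen (d : PySem.Dict String Int) (hn : (d.items.map Prod.fst).Nodup) :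
    ∀ ord : List String, ord.Nodup →
      (ord.filterMap (fun k => (PySem.Dict.get? d k).map (fun v => (k, v)))).Perm
        (d.items.filter (fun p => ord.contains p.1)) := by
  intro ord
  induction ord with
  | nil => simp
  | cons k ord ih =>
    intro hnd
    rcases List.nodup_cons.1 hnd with ⟨hk, hnd'⟩
    have hsplit := pvFilter_or_perm (fun p => p.1 == k) (fun p => ord.contains p.1) d.items
      (by
        intro p _ ⟨h1, h2⟩
        rw [beq_iff_eq] at h1
        exact hk (h1 ▸ (by simpa using h2)))
    have hcont : (d.items.filter (fun p => (k :: ord).contains p.1))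
        = d.items.filter (fun p => p.1 == k || ord.contains p.1) := by
      apply List.filter_congr
      intro p _
      by_cases h : p.1 = k <;> simp [h]
    rw [hcont, List.filterMap_cons]
    refine List.Perm.trans ?_ hsplit.symm
    rcases h : PySem.Dict.get? d k with _ | v
    · have : d.items.filter (fun p => p.1 == k) = [] := by
        apply pvFilter_key_nil
        intro hmem
        rw [PySem.Dict.get?_eq_none_iff_not_mem_keys] at h
        exact h (by simpa [PySem.Dict.keys] using hmem)
      simp only [Option.map_none, this, List.nil_append]
      exact ih hnd'
    · have hkv : (k, v) ∈ d.items := by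
        rw [PySem.Dict.get?_eq_some_iff_mem_items d k v (by simpa [PySem.Dict.keys] using hn)] at h
        exact h
      rw [pvFilter_key_single d.items hn k v hkv]
      simp only [Option.map_some]
      exact (ih hnd').cons (k, v)

theorem pvLoopA (d : PySem.Dict String Int) :
    ∀ (ord : List String) (acc : List String),
    ord.foldl (fun parts key =>
        if PySem.Dict.contains d key && decide (0 < PySem.Dict.getD d key 0) then
          parts ++ [key ++ PySem.Int.toStr (PySem.Dict.getD d key 0)]
        else parts) acc
    = acc ++ ((ord.filterMap (fun k => (PySem.Dict.get? d k).map (fun v => (k, v)))).filter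
        pvPos).map pvEmit := by
  intro ord
  induction ord with
  | nil => simp
  | cons k ord ih =>
    intro acc
    simp only [List.foldl_cons, List.filterMap_cons]
    rcases h : PySem.Dict.get? d k with _ | v
    · have hc : PySem.Dict.contains d k = false := by
        rw [PySem.Dict.contains_eq_isSome_get?, h]; rfl
      simp only [hc, Bool.false_and, if_neg Bool.false_ne_true, Option.map_none]
      exact ih acc
    · have hc : PySem.Dict.contains d k = true := by
        rw [PySem.Dict.contains_eq_isSome_get?, h]; rfl
      have hg : PySem.Dict.getD d k 0 = v := by
        rw [PySem.Dict.getD_eq_get?_getD, h]; rfl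
      simp only [hc, hg, Bool.true_and, Option.map_some]
      by_cases hv : 0 < v
      · simp only [decide_eq_true hv, if_true, List.filter_cons,
          show pvPos (k, v) = true by simpa [pvPos] using hv, ih, List.map_cons]
        simp [pvEmit]
      · simp only [decide_eq_false hv, if_neg Bool.false_ne_true, List.filter_cons,
          show pvPos (k, v) = false by simpa [pvPos] using hv, ih]

theorem pvSorted_fst_strict (m : List (String × Int)) (hm : (m.map Prod.fst).Nodup) :
    (PySem.List.sorted m (fun p => p.1)).Pairwise (fun a b => a.1 < b.1) := by
  have h1 := PySem.List.sorted_pairwise m (fun p => p.1)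
  have hperm := PySem.List.sorted_perm m (fun p => p.1) false
  have hnd : ((PySem.List.sorted m (fun p => p.1)).map Prod.fst).Nodup :=
    ((hperm.map Prod.fst).nodup_iff).2 hm
  have hne : (PySem.List.sorted m (fun p => p.1)).Pairwise (fun a b => a.1 ≠ b.1) :=
    List.pairwise_map.1 hnd
  exact (h1.and hne).imp (fun h => lt_of_le_of_ne h.1 h.2)

theorem pvMem_known {d : PySem.Dict String Int} {a : String × Int} (h : a ∈ pvKnown d) :
    a.1 ∈ pvOrder := by
  rcases List.mem_filterMap.1 h with ⟨k, hk, hfk⟩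
  rcases Option.map_eq_some_iff.1 hfk with ⟨v, _, hav⟩
  rw [← hav]
  exact hk

theorem pvKnown_pairwise (d : PySem.Dict String Int) :
    (pvKnown d).Pairwise (fun a b => pvSKey a.1 < pvSKey b.1) := by
  unfold pvKnown
  rw [List.pairwise_filterMap]
  have hord : pvOrder.Pairwise (fun k k' => pvSKey k < pvSKey k') :=
    (show pvOrder.Pairwise
        (fun k k' => PySem.Dict.getD pvRank k 6 < PySem.Dict.getD pvRank k' 6) by decide).imp
      (fun h => pvSKey_lt_of_rank_lt h)
  refine hord.imp_of_mem ?_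
  intro k k' _ _ hlt b hb b' hb'
  rcases Option.map_eq_some_iff.1 hb with ⟨v, _, hbv⟩
  rcases Option.map_eq_some_iff.1 hb' with ⟨v', _, hbv'⟩
  rw [← hbv, ← hbv']
  exact hlt

theorem pvUnk_rank {p : String × Int} (h : pvUnk p = true) :
    PySem.Dict.getD pvRank p.1 6 = 6 := by
  apply pvRank_getD_of_not_mem
  simpa [pvUnk] using h

theorem pvSplit (d : PySem.Dict String Int) (hn : (d.items.map Prod.fst).Nodup) :
    PySem.List.sorted d.items (fun kv => pvSKey kv.1)
      = pvKnown d ++ PySem.List.sorted (d.items.filter pvUnk) (fun p => p.1) := by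
  apply PySem.List.sorted_eq_of_perm_of_pairwise_lt
  · have h1 : (pvKnown d).Perm (d.items.filter (fun p => pvOrder.contains p.1)) :=
      pvKnown_perm_gen d hn pvOrder (by decide)
    have h2 := PySem.List.sorted_perm (d.items.filter pvUnk) (fun p => p.1) false
    refine (h1.append h2).trans ?_
    exact List.filter_append_perm (fun p => pvOrder.contains p.1) d.items
  · rw [List.pairwise_append]
    refine ⟨pvKnown_pairwise d, ?_, ?_⟩
    · have hnf : ((d.items.filter pvUnk).map Prod.fst).Nodup := by
        refine List.Nodup.sublist ?_ hn
        exact List.Sublist.map Prod.fst List.filter_sublist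
      have hstrict := pvSorted_fst_strict (d.items.filter pvUnk) hnf
      refine hstrict.imp_of_mem ?_
      intro a b ha hb hab
      have hua : pvUnk a = true := by
        have := (PySem.List.mem_sorted (d.items.filter pvUnk) (fun p => p.1) false a).1 ha
        exact (List.mem_filter.1 this).2
      have hub : pvUnk b = true := by
        have := (PySem.List.mem_sorted (d.items.filter pvUnk) (fun p => p.1) false b).1 hb
        exact (List.mem_filter.1 this).2
      exact (pvSKey_lt_iff_of_rank_eq ((pvUnk_rank hua).trans (pvUnk_rank hub).symm)).2 hab
    · intro a ha b hb
      have hub : pvUnk b = true := by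
        have := (PySem.List.mem_sorted (d.items.filter pvUnk) (fun p => p.1) false b).1 hb
        exact (List.mem_filter.1 this).2
      apply pvSKey_lt_of_rank_lt
      rw [pvUnk_rank hub]
      exact pvRank_lt_of_mem a.1 (pvMem_known ha)

theorem pvFilterSortedA (l : List (String × Int)) (hn : (l.map Prod.fst).Nodup) :
    (PySem.List.sorted l (fun p => p.1)).filter pvUnk
      = PySem.List.sorted (l.filter pvUnk) (fun p => p.1) := by
  symm
  apply PySem.List.sorted_eq_of_perm_of_pairwise_lt
  · exact (PySem.List.sorted_perm l (fun p => p.1) false).filter pvUnk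
  · exact (pvSorted_fst_strict l hn).filter pvUnk


-- the two programs agree on every input
theorem pvMain (composition : List (String × Int)) :
    format_composition_string_py composition = format_composition_string_py_alt composition := by
  have hn : ((PySem.Dict.ofList composition).items.map Prod.fst).Nodup := by
    have := PySem.Dict.nodup_keys_ofList composition
    simpa [PySem.Dict.keys] using this
  by_cases hsz : PySem.Dict.size (PySem.Dict.ofList composition) = 0
  · have hitems : (PySem.Dict.ofList composition).items = [] :=
      List.length_eq_zero_iff.1 hsz
    simp only [format_composition_string_py, format_composition_string_py_alt, if_pos hsz,
      hitems]
    rfl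
  · simp only [format_composition_string_py, format_composition_string_py_alt, if_neg hsz]
    rw [pvLoopA (PySem.Dict.ofList composition) pvOrder []]
    rw [pvSorted2A (PySem.Dict.ofList composition).items hn]
    rw [PySem.List.foldl_append_if (fun p : String × Int => !pvOrder.contains p.1 && decide (0 < p.2))
      (fun p : String × Int => p.1 ++ PySem.Int.toStr p.2)]
    rw [pvSorted2B (PySem.Dict.ofList composition).items]
    rw [pvSplit (PySem.Dict.ofList composition) hn]
    rw [show (fun kv : String × Int => decide (0 < kv.2)) = pvPos from rfl,
      show (fun kv : String × Int => kv.1 ++ PySem.Int.toStr kv.2) = pvEmit from rfl,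
      show (fun p : String × Int => !pvOrder.contains p.1 && decide (0 < p.2))
        = (fun p => pvUnk p && pvPos p) from rfl]
    rw [List.filter_append, List.map_append]
    have hcomm : (PySem.List.sorted (PySem.Dict.ofList composition).items
        (fun p => p.1)).filter (fun p => pvUnk p && pvPos p)
        = ((PySem.List.sorted (PySem.Dict.ofList composition).items
            (fun p => p.1)).filter pvUnk).filter pvPos := by
      rw [List.filter_filter]
      apply List.filter_congr
      intro p _
      exact Bool.and_comm _ _
    rw [hcomm, pvFilterSortedA (PySem.Dict.ofList composition).items hn]
    simp [pvKnown]

-- ===== VERDICT (by name: the statement is the Claim_ definition above) =====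
theorem format_composition_string_py_spec : Claim_equal_format_composition_string_py := by
  intro composition _
  unfold Spec_format_composition_string_py
  exact pvMain composition
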